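-- pv_equiv track=rewrite | github.com/mdrafeul/ML_Data_science | helper.py | add_credibility
-- ===== SOURCE A (Python) =====
-- def add_credibility(d_list, credible_domains, non_credible_domains):
--     level = []
--     if d_list[0] == 'NO URL':
--         return ('NO URL')
--     else:
--         for i in range(len(d_list)):
--             if d_list[i] in(credible_domains):
--                 level.append('credible')
--             elif d_list[i] in(non_credible_domains):
--                 level.append('non-credible')
--             else:
--                 pass
--         if (len(level)) < 1:
--             return ('')
--         elif (len(level))< 2:
--             return(level[0])
--         else:
--             result=False
--             result = all(element == level[0] for element in level)
--             if result :
--                 return(level[0])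
--             else:
--                 return('mixed')
-- ===== SOURCE B (Python) =====
-- def add_credibility(d_list, credible_domains, non_credible_domains):
--     if d_list[0] == 'NO URL':
--         return 'NO URL'
--     has_credible = any(d in credible_domains for d in d_list)
--     has_non_credible = any(d in non_credible_domains and d not in credible_domains
--                            for d in d_list)
--     if has_credible:
--         return 'mixed' if has_non_credible else 'credible'
--     return 'non-credible' if has_non_credible else ''
-- ===== Notes on version B (the rewrite author's own statement) =====
-- stated objective: simpler
-- what changed: Replaces the intermediate label list plus len()-cases and the all()-equality scan with two declarative any() existence queries (credible match; non-credible-but-not-credible match) and a direct four-way summary of the two booleans.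
import Mathlib
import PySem

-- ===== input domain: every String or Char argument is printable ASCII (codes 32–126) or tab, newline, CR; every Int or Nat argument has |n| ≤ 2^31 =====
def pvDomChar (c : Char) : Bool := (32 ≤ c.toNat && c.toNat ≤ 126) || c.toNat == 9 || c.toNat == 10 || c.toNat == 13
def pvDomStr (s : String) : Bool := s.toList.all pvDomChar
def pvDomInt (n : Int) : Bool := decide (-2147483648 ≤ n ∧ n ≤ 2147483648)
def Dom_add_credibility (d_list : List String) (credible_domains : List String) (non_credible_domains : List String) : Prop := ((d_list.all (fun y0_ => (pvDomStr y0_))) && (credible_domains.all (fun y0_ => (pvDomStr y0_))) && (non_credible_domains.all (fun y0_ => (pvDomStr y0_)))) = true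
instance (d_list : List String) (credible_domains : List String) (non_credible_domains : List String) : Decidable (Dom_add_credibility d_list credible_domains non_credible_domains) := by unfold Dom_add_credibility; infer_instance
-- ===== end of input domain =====

-- B replaces A's intermediate label list and its len()/all() post-processing by two
-- declarative any() existence queries and a direct summary (objective: simpler).

-- ===== PORT A =====
-- loop body of A: append the label for one domain to the accumulated `level` list
def pvStepA (credible_domains non_credible_domains : List String) (lv : List String) (d : String) : List String :=
  if d ∈ credible_domains then lv ++ ["credible"]
  else if d ∈ non_credible_domains then lv ++ ["non-credible"]
  else lv

def add_credibility (d_list : List String) (credible_domains : List String) (non_credible_domains : List String) : String :=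
  match PySem.List.pyGet? d_list 0 with
  | none => ""   -- d_list[0] raises IndexError in Python; excluded by Pre_
  | some d0 =>
    if d0 = "NO URL" then "NO URL"
    else
      let level := d_list.foldl (pvStepA credible_domains non_credible_domains) []
      if level.length < 1 then ""
      else if level.length < 2 then level.headD ""
      else if level.all (fun e => e = level.headD "") then level.headD ""
      else "mixed"

-- ===== PORT B =====
def add_credibility_alt (d_list : List String) (credible_domains : List String) (non_credible_domains : List String) : String :=
  match d_list with
  | [] => ""   -- d_list[0] raises IndexError in Python; excluded by Pre_
  | d0 :: _ =>
    if d0 = "NO URL" then "NO URL"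
    else
      let has_credible := d_list.any (fun d => decide (d ∈ credible_domains))
      let has_non_credible := d_list.any (fun d => decide (d ∈ non_credible_domains ∧ d ∉ credible_domains))
      if has_credible then (if has_non_credible then "mixed" else "credible")
      else (if has_non_credible then "non-credible" else "")

-- ===== PRECONDITION & SPEC =====
-- Pre_ excludes only the empty d_list, on which A's `d_list[0]` raises IndexError.
def Pre_add_credibility (d_list : List String) (credible_domains : List String) (non_credible_domains : List String) : Prop := d_list ≠ []
instance (d_list : List String) (credible_domains : List String) (non_credible_domains : List String) : Decidable (Pre_add_credibility d_list credible_domains non_credible_domains) := by unfold Pre_add_credibility; infer_instance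

def pvWitness_add_credibility : List String × List String × List String := (["cnn.com", "foo.net"], ["cnn.com"], ["foo.net"])

def Spec_add_credibility (d_list : List String) (credible_domains : List String) (non_credible_domains : List String) (out : String) : Prop := out = add_credibility_alt d_list credible_domains non_credible_domains
instance (d_list : List String) (credible_domains : List String) (non_credible_domains : List String) (out : String) : Decidable (Spec_add_credibility d_list credible_domains non_credible_domains out) := by unfold Spec_add_credibility; infer_instance

-- ===== CLAIM (what is proved, stated in full; the proofs are below) =====
def Claim_equal_add_credibility : Prop := ∀ (d_list : List String) (credible_domains : List String) (non_credible_domains : List String), Dom_add_credibility d_list credible_domains non_credible_domains → Pre_add_credibility d_list credible_domains non_credible_domains → Spec_add_credibility d_list credible_domains non_credible_domains (add_credibility d_list credible_domains non_credible_domains)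

-- ===== LEMMAS AND PROOFS =====

-- "credible" occurs in A's level list iff some domain is in credible_domains
lemma pv_mem_cred (credible_domains non_credible_domains : List String) (l : List String) (lv : List String) :
    ("credible" ∈ l.foldl (pvStepA credible_domains non_credible_domains) lv)
      ↔ ("credible" ∈ lv ∨ l.any (fun d => decide (d ∈ credible_domains)) = true) := by
  induction l generalizing lv with
  | nil => simp
  | cons d t ih =>
    simp only [List.foldl_cons, pvStepA, List.any_cons]
    by_cases h1 : d ∈ credible_domains
    · rw [if_pos h1, ih]; simp [h1]
    · rw [if_neg h1]
      by_cases h2 : d ∈ non_credible_domains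
      · rw [if_pos h2, ih]; simp [h1]
      · rw [if_neg h2, ih]; simp [h1]

-- "non-credible" occurs in A's level list iff some domain is in non_credible_domains but not credible_domains
lemma pv_mem_noncred (credible_domains non_credible_domains : List String) (l : List String) (lv : List String) :
    ("non-credible" ∈ l.foldl (pvStepA credible_domains non_credible_domains) lv)
      ↔ ("non-credible" ∈ lv ∨ l.any (fun d => decide (d ∈ non_credible_domains ∧ d ∉ credible_domains)) = true) := by
  induction l generalizing lv with
  | nil => simp
  | cons d t ih =>
    simp only [List.foldl_cons, pvStepA, List.any_cons]
    by_cases h1 : d ∈ credible_domains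
    · rw [if_pos h1, ih]; simp [h1]
    · rw [if_neg h1]
      by_cases h2 : d ∈ non_credible_domains
      · rw [if_pos h2, ih]; simp [h1, h2]
      · rw [if_neg h2, ih]; simp [h1, h2]

-- every element of A's level list is one of the two labels
lemma pv_elems (credible_domains non_credible_domains : List String) (l : List String) (lv : List String)
    (h : ∀ e ∈ lv, e = "credible" ∨ e = "non-credible") :
    ∀ e ∈ l.foldl (pvStepA credible_domains non_credible_domains) lv, e = "credible" ∨ e = "non-credible" := by
  induction l generalizing lv with
  | nil => exact h
  | cons d t ih =>
    simp only [List.foldl_cons, pvStepA]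
    split_ifs with h1 h2
    · refine ih _ ?_
      intro e he
      rcases List.mem_append.1 he with he | he
      · exact h e he
      · left; simpa using he
    · refine ih _ ?_
      intro e he
      rcases List.mem_append.1 he with he | he
      · exact h e he
      · right; simpa using he
    · exact ih _ h

-- A's len()/all() post-processing equals B's two-boolean summary on label lists
lemma pv_post_eq (level : List String)
    (h : ∀ e ∈ level, e = "credible" ∨ e = "non-credible") :
    (if level.length < 1 then "" else if level.length < 2 then level.headD ""
     else if level.all (fun e => e = level.headD "") then level.headD "" else "mixed")
    = (if "credible" ∈ level then (if "non-credible" ∈ level then "mixed" else "credible")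
       else (if "non-credible" ∈ level then "non-credible" else "")) := by
  match level with
  | [] => simp
  | [x] =>
    rcases h x (by simp) with hx | hx <;> subst hx <;> simp
  | x :: y :: rest =>
    rw [if_neg (by simp : ¬ ((x :: y :: rest).length < 1)),
        if_neg (by simp : ¬ ((x :: y :: rest).length < 2))]
    by_cases hcm : "credible" ∈ x :: y :: rest <;> by_cases hnm : "non-credible" ∈ x :: y :: rest
    · have hAll : ((x :: y :: rest).all (fun e => e = (x :: y :: rest).headD "")) = false := by
        rcases h x List.mem_cons_self with hx | hx
        · exact List.all_eq_false.2 ⟨"non-credible", hnm, by simp [hx]⟩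
        · exact List.all_eq_false.2 ⟨"credible", hcm, by simp [hx]⟩
      rw [hAll]
      simp [hcm, hnm]
    · have hall : ∀ e ∈ x :: y :: rest, e = "credible" := by
        intro e he
        rcases h e he with h' | h'
        · exact h'
        · exact absurd (h' ▸ he) hnm
      have hx : x = "credible" := hall x List.mem_cons_self
      have hAll : ((x :: y :: rest).all (fun e => e = (x :: y :: rest).headD "")) = true := by
        simp only [List.all_eq_true, decide_eq_true_eq, List.headD_cons]
        intro e he; rw [hall e he, hx]
      rw [hAll]
      simp only [List.mem_cons, not_or] at hnm
      simp [hx, hnm.2.1, hnm.2.2]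
    · have hall : ∀ e ∈ x :: y :: rest, e = "non-credible" := by
        intro e he
        rcases h e he with h' | h'
        · exact absurd (h' ▸ he) hcm
        · exact h'
      have hx : x = "non-credible" := hall x List.mem_cons_self
      have hAll : ((x :: y :: rest).all (fun e => e = (x :: y :: rest).headD "")) = true := by
        simp only [List.all_eq_true, decide_eq_true_eq, List.headD_cons]
        intro e he; rw [hall e he, hx]
      rw [hAll]
      simp only [List.mem_cons, not_or] at hcm
      simp [hx, hcm.2.1, hcm.2.2]
    · exfalso
      rcases h x List.mem_cons_self with hx | hx
      · exact hcm (hx ▸ List.mem_cons_self)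
      · exact hnm (hx ▸ List.mem_cons_self)

-- ===== VERDICT (by name: the statement is the Claim_ definition above) =====
theorem add_credibility_spec : Claim_equal_add_credibility := by
  intro d_list credible_domains non_credible_domains _ hpre
  unfold Spec_add_credibility add_credibility add_credibility_alt
  obtain ⟨d0, rest, rfl⟩ : ∃ d0 rest, d_list = d0 :: rest := by
    cases d_list with
    | nil => exact absurd rfl hpre
    | cons a t => exact ⟨a, t, rfl⟩
  have hget : PySem.List.pyGet? (d0 :: rest) 0 = some d0 := by
    simp [PySem.List.pyGet?, PySem.List.pyIdx?]
  simp only [hget]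
  by_cases h0 : d0 = "NO URL"
  · rw [if_pos h0, if_pos h0]
  · rw [if_neg h0, if_neg h0]
    have hc := pv_mem_cred credible_domains non_credible_domains (d0 :: rest) []
    have hn := pv_mem_noncred credible_domains non_credible_domains (d0 :: rest) []
    simp only [List.not_mem_nil, false_or] at hc hn
    rw [pv_post_eq _ (pv_elems credible_domains non_credible_domains (d0 :: rest) [] (by simp))]
    by_cases hC : ((d0 :: rest).any (fun d => decide (d ∈ credible_domains))) = true <;>
      by_cases hN : ((d0 :: rest).any (fun d => decide (d ∈ non_credible_domains ∧ d ∉ credible_domains))) = true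
    · rw [if_pos (hc.mpr hC), if_pos (hn.mpr hN), if_pos hC, if_pos hN]
    · rw [if_pos (hc.mpr hC), if_neg (fun hm => hN (hn.mp hm)), if_pos hC, if_neg hN]
    · rw [if_neg (fun hm => hC (hc.mp hm)), if_pos (hn.mpr hN), if_neg hC, if_pos hN]
    · rw [if_neg (fun hm => hC (hc.mp hm)), if_neg (fun hm => hN (hn.mp hm)), if_neg hC, if_neg hN]
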